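-- pv_equiv track=rewrite | github.com/DragonKyro/LeetCode | problems/926_flip_string_to_monotone_increasing/solution.py | minFlipsMonoIncr
-- ===== SOURCE A (Python) =====
-- def minFlipsMonoIncr(s: str) -> int:
--     ones = 0
--     flips = 0
--     for c in s:
--         if c == '1':
--             ones += 1
--         else:
--             flips = min(flips + 1, ones)
--     return flips
-- ===== SOURCE B (Python) =====
-- def minFlipsMonoIncr(s: str) -> int:
--     # Split-point formulation: a monotone result is 0...01...1; for each split k,
--     # cost = ones before k + zeros at/after k.  Take the minimum over k = 0..n.
--     n = len(s)
--     total = 0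
--     for c in s:
--         if c == '1':
--             total += 1
--     ones = 0
--     k = 0
--     best = n - total          # split at k = 0: flip every '0'
--     for c in s:
--         k += 1
--         if c == '1':
--             ones += 1
--         best = min(best, ones + (n - k) - (total - ones))
--     return best
-- ===== Notes on version B (the rewrite author's own statement) =====
-- stated objective: alternative
-- what changed: Replaces the online DP recurrence flips = min(flips+1, ones) by the split-point formulation: precompute the total number of ones, then minimise ones-before-k + zeros-at-or-after-k over all split positions k = 0..n.
import Mathlib
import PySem

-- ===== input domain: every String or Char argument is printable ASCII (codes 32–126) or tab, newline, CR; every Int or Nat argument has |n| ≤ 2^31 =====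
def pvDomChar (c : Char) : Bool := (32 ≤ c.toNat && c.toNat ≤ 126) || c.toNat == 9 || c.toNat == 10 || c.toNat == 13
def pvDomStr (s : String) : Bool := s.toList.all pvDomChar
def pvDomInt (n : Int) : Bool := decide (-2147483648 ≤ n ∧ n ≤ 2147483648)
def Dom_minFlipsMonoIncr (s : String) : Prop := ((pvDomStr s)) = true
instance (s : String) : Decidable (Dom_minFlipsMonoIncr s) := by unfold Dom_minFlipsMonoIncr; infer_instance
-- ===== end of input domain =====

-- B replaces A's online DP recurrence flips = min(flips+1, ones) by the split-point
-- formulation (precomputed total of ones, minimum over all split positions); alternative,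
-- same asymptotic cost.

-- ===== PORT A =====
def minFlipsMonoIncr (s : String) : Int :=
  (s.toList.foldl
    (fun (st : Int × Int) c =>
      if c == '1' then (st.1 + 1, st.2) else (st.1, min (st.2 + 1) st.1))
    (0, 0)).2

-- ===== PORT B =====
def pvStepB (n total : Int) (st : Int × Int × Int) (c : Char) : Int × Int × Int :=
  let k := st.2.1 + 1
  let ones := if c == '1' then st.1 + 1 else st.1
  (ones, k, min st.2.2 (ones + (n - k) - (total - ones)))

def minFlipsMonoIncr_alt (s : String) : Int :=
  let n : Int := PySem.Str.len s
  let total : Int := s.toList.foldl (fun t c => if c == '1' then t + 1 else t) 0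
  (s.toList.foldl (pvStepB n total) (0, 0, n - total)).2.2

-- ===== PRECONDITION & SPEC =====
def Spec_minFlipsMonoIncr (s : String) (out : Int) : Prop := out = minFlipsMonoIncr_alt s
instance (s : String) (out : Int) : Decidable (Spec_minFlipsMonoIncr s out) := by unfold Spec_minFlipsMonoIncr; infer_instance

-- ===== CLAIM (what is proved, stated in full; the proofs are below) =====
def Claim_equal_minFlipsMonoIncr : Prop := ∀ (s : String), Dom_minFlipsMonoIncr s → Spec_minFlipsMonoIncr s (minFlipsMonoIncr s)

-- ===== LEMMAS AND PROOFS =====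

-- number of '1's / of non-'1's, as Int
def pvOnes (l : List Char) : Int := (l.count '1' : Int)
def pvZeros (l : List Char) : Int := (l.length : Int) - pvOnes l
-- cost of the monotone target that is 0s before position k and 1s from k on
def pvCand (l : List Char) (k : Nat) : Int := pvOnes (l.take k) + pvZeros (l.drop k)
-- minimum of pvCand over k = 0 .. l.length
def pvM (l : List Char) : Int :=
  (List.range l.length).foldl (fun b k => min b (pvCand l (k + 1))) (pvCand l 0)

lemma pvOnes_append (l : List Char) (c : Char) :
    pvOnes (l ++ [c]) = pvOnes l + (if c == '1' then 1 else 0) := by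
  by_cases h : c = '1' <;> simp [pvOnes, h]

lemma pvZeros_append (l : List Char) (c : Char) :
    pvZeros (l ++ [c]) = pvZeros l + (if c == '1' then 0 else 1) := by
  by_cases h : c = '1'
  · simp [pvZeros, pvOnes_append, h]
  · simp [pvZeros, pvOnes_append, h]
    ring

lemma pvOnes_take_drop (l : List Char) (k : Nat) :
    pvOnes (l.take k) + pvOnes (l.drop k) = pvOnes l := by
  have h : (l.take k).count '1' + (l.drop k).count '1' = l.count '1' := by
    rw [← List.count_append, List.take_append_drop]
  simp only [pvOnes]
  exact_mod_cast h

lemma pvCand_length (l : List Char) : pvCand l l.length = pvOnes l := by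
  simp [pvCand, pvZeros, pvOnes]

lemma pvCand_append_of_le (l : List Char) (c : Char) (k : Nat) (hk : k ≤ l.length) :
    pvCand (l ++ [c]) k = pvCand l k + (if c == '1' then 0 else 1) := by
  rw [pvCand, pvCand, List.take_append_of_le_length hk, List.drop_append_of_le_length hk,
    pvZeros_append]
  ring

lemma foldlMin_add (g : Nat → Int) (d : Int) : ∀ (xs : List Nat) (a : Int),
    xs.foldl (fun b k => min b (g k + d)) (a + d) = xs.foldl (fun b k => min b (g k)) a + d := by
  intro xs
  induction xs with
  | nil => intro a; simp
  | cons x xs ih =>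
    intro a
    simp only [List.foldl_cons]
    rw [show min (a + d) (g x + d) = min a (g x) + d by omega, ih (min a (g x))]

lemma pvM_le_ones (l : List Char) : pvM l ≤ pvOnes l := by
  rcases h : l.length with _ | m
  · rw [List.length_eq_zero_iff] at h
    subst h
    simp [pvM, pvCand, pvZeros, pvOnes]
  · have : pvM l = min ((List.range m).foldl (fun b k => min b (pvCand l (k + 1))) (pvCand l 0))
        (pvCand l (m + 1)) := by
      rw [pvM, h, List.range_succ, List.foldl_append]
      rfl
    rw [this]
    have hm : m + 1 = l.length := h.symm
    rw [hm, pvCand_length]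
    exact min_le_right _ _

lemma pvM_append (l : List Char) (c : Char) :
    pvM (l ++ [c]) = if c == '1' then pvM l else min (pvM l + 1) (pvOnes l) := by
  have hlen : (l ++ [c]).length = l.length + 1 := by simp
  have hsplit : pvM (l ++ [c]) =
      min ((List.range l.length).foldl (fun b k => min b (pvCand (l ++ [c]) (k + 1))) (pvCand (l ++ [c]) 0))
        (pvCand (l ++ [c]) (l.length + 1)) := by
    rw [pvM, hlen, List.range_succ, List.foldl_append]
    rfl
  have hlast : pvCand (l ++ [c]) (l.length + 1) = pvOnes l + (if c == '1' then 1 else 0) := by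
    rw [← hlen, pvCand_length, pvOnes_append]
  have hcongr : (List.range l.length).foldl (fun b k => min b (pvCand (l ++ [c]) (k + 1))) (pvCand (l ++ [c]) 0)
      = (List.range l.length).foldl (fun b k => min b (pvCand l (k + 1) + (if c == '1' then 0 else 1)))
          (pvCand l 0 + (if c == '1' then 0 else 1)) := by
    rw [pvCand_append_of_le l c 0 (Nat.zero_le _)]
    apply List.foldl_ext
    intro b k hk
    rw [pvCand_append_of_le l c (k + 1) (List.mem_range.mp hk)]
  rw [hsplit, hcongr, hlast, foldlMin_add]
  by_cases h : (c == '1')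
  · simp only [h, if_true]
    have h1 : pvM l ≤ pvOnes l + 1 := le_trans (pvM_le_ones l) (by omega)
    simpa [pvM] using min_eq_left h1
  · simp only [h]
    rfl

-- A's loop computes (ones, pvM)
lemma foldA_eq (l : List Char) :
    l.foldl (fun (st : Int × Int) c =>
        if c == '1' then (st.1 + 1, st.2) else (st.1, min (st.2 + 1) st.1)) (0, 0)
      = (pvOnes l, pvM l) := by
  induction l using List.reverseRecOn with
  | nil => simp [pvOnes, pvM, pvCand, pvZeros]
  | append_singleton l c ih =>
    rw [List.foldl_append, ih, List.foldl_cons, List.foldl_nil, pvOnes_append, pvM_append]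
    by_cases h : (c == '1') <;> simp [h]

-- B's loop: general invariant
lemma foldB_eq (n total : Int) : ∀ (m : List Char) (o0 k0 b0 : Int),
    m.foldl (pvStepB n total) (o0, k0, b0) =
      (o0 + pvOnes m, k0 + m.length,
        (List.range m.length).foldl
          (fun b j => min b ((o0 + pvOnes (m.take (j + 1))) + (n - (k0 + j + 1))
            - (total - (o0 + pvOnes (m.take (j + 1)))))) b0) := by
  intro m
  induction m using List.reverseRecOn with
  | nil => intro o0 k0 b0; simp [pvOnes]
  | append_singleton m c ih =>
    intro o0 k0 b0
    rw [List.foldl_append, ih, List.foldl_cons, List.foldl_nil]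
    have hones : (if c == '1' then o0 + pvOnes m + 1 else o0 + pvOnes m)
        = o0 + pvOnes (m ++ [c]) := by
      rw [pvOnes_append]
      by_cases h : (c == '1')
      · simp [h]; omega
      · simp [h]
    have hlen : (m ++ [c]).length = m.length + 1 := by simp
    have hcongr : (List.range m.length).foldl
        (fun b j => min b ((o0 + pvOnes ((m ++ [c]).take (j + 1))) + (n - (k0 + j + 1))
          - (total - (o0 + pvOnes ((m ++ [c]).take (j + 1)))))) b0
        = (List.range m.length).foldl
            (fun b j => min b ((o0 + pvOnes (m.take (j + 1))) + (n - (k0 + j + 1))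
              - (total - (o0 + pvOnes (m.take (j + 1)))))) b0 := by
      apply List.foldl_ext
      intro b j hj
      rw [List.take_append_of_le_length (List.mem_range.mp hj)]
    have htake : (m ++ [c]).take (m.length + 1) = m ++ [c] := by
      apply List.take_of_length_le; simp
    rw [hlen, List.range_succ, List.foldl_append, hcongr, List.foldl_cons, List.foldl_nil, htake]
    simp only [pvStepB, hones]
    refine Prod.ext rfl (Prod.ext ?_ ?_)
    · simp
      ring
    · simp

lemma candB_eq (l : List Char) (j : Nat) (hj : j < l.length) :
    (0 : Int) + pvOnes (l.take (j + 1)) + ((l.length : Int) - (0 + j + 1))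
      - (pvOnes l - (0 + pvOnes (l.take (j + 1)))) = pvCand l (j + 1) := by
  have hsplit := pvOnes_take_drop l (j + 1)
  have hdlen : ((l.drop (j + 1)).length : Int) = (l.length : Int) - (j + 1) := by
    rw [List.length_drop]; omega
  rw [pvCand, pvZeros, hdlen]
  omega

-- B computes pvM
lemma altB_eq (s : String) : minFlipsMonoIncr_alt s = pvM s.toList := by
  rw [minFlipsMonoIncr_alt]
  have htot : s.toList.foldl (fun t c => if c == '1' then t + 1 else t) 0
      = pvOnes s.toList := by
    simpa [pvOnes] using PySem.List.foldl_beq_add_one (l := s.toList) (v := '1') (a := (0 : Int))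
  simp only [PySem.Str.len_eq, htot, foldB_eq]
  have hinit : (s.toList.length : Int) - pvOnes s.toList = pvCand s.toList 0 := by
    simp [pvCand, pvZeros, pvOnes]
  rw [pvM, ← hinit]
  apply List.foldl_ext
  intro b j hj
  rw [← candB_eq s.toList j (List.mem_range.mp hj)]

-- ===== VERDICT (by name: the statement is the Claim_ definition above) =====
theorem minFlipsMonoIncr_spec : Claim_equal_minFlipsMonoIncr := by
  intro s _
  unfold Spec_minFlipsMonoIncr
  rw [minFlipsMonoIncr, foldA_eq, altB_eq]
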